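-- pv_equiv track=rewrite | github.com/alzorix/KFU_LERN | homework/analyze_sales/main.py | find_best_sales_day
-- ===== SOURCE A (Python) =====
-- def find_best_sales_day(sales: list, days: int):
--     max_total = float("-inf")
--     best_day = None
--     for day_id in range(1, days + 1):
--         day_total = 0
--         for d, amount in sales:
--             if d == day_id:
--                 day_total += amount
--         if day_total > max_total:
--             max_total = day_total
--             best_day = day_id
--     return best_day
-- ===== SOURCE B (Python) =====
-- def find_best_sales_day(sales: list, days: int):
--     # Aggregate per-day totals in one pass, then take the earliest day with the
--     # maximal total via max() over the day range (max returns the first maximum).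
--     totals = {}
--     for d, amount in sales:
--         totals[d] = totals.get(d, 0) + amount
--     if days < 1:
--         return None
--     return max(range(1, days + 1), key=lambda day: totals.get(day, 0))
-- ===== Notes on version B (the rewrite author's own statement) =====
-- stated objective: faster
-- what changed: B aggregates per-day totals into a dict in one pass over sales and then selects the best day with a single max(range, key=...) call, instead of A's re-scan of the whole sales list for every day and hand-rolled running-max loop.
import Mathlib
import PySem

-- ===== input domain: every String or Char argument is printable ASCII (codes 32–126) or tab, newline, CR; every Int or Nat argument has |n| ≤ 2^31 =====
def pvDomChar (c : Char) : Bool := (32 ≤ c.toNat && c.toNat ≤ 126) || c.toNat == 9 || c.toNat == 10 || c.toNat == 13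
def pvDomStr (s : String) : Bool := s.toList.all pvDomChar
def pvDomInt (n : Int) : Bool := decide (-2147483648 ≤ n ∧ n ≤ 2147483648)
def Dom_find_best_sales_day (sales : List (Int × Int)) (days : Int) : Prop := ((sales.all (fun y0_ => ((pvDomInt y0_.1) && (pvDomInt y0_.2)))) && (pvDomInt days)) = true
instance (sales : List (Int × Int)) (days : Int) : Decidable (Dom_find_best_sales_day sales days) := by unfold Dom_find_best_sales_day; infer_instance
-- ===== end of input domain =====

-- B builds per-day totals in one pass and picks the best day with a single max-with-key over the day range (objective: faster, asymptotic).

-- ===== PORT A =====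
-- max_total starts at float("-inf"), which every Int exceeds: ported as Option Int with none = -inf.
def find_best_sales_day (sales : List (Int × Int)) (days : Int) : Option Int :=
  ((PySem.List.pyRange 1 (days + 1) 1).foldl
    (fun (st : Option Int × Option Int) day_id =>
      let day_total := sales.foldl (fun acc p => if p.1 == day_id then acc + p.2 else acc) 0
      match st.1 with
      | none => (some day_total, some day_id)
      | some m => if day_total > m then (some day_total, some day_id) else st)
    (none, none)).2

-- ===== PORT B =====
def find_best_sales_day_alt (sales : List (Int × Int)) (days : Int) : Option Int :=
  let totals := sales.foldl (fun (d : PySem.Dict Int Int) p => d.modify p.1 0 (· + p.2)) PySem.Dict.empty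
  if days < 1 then none
  else PySem.List.max? (PySem.List.pyRange 1 (days + 1) 1) (fun day => totals.getD day 0)

-- ===== PRECONDITION & SPEC =====
def Spec_find_best_sales_day (sales : List (Int × Int)) (days : Int) (out : Option Int) : Prop := out = find_best_sales_day_alt sales days
instance (sales : List (Int × Int)) (days : Int) (out : Option Int) : Decidable (Spec_find_best_sales_day sales days out) := by unfold Spec_find_best_sales_day; infer_instance

-- ===== CLAIM =====
def Claim_equal_find_best_sales_day : Prop := ∀ (sales : List (Int × Int)) (days : Int), Dom_find_best_sales_day sales days → Spec_find_best_sales_day sales days (find_best_sales_day sales days)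

-- ===== LEMMAS AND PROOFS =====

-- The dict built by B's aggregation pass holds, at any key, exactly A's inner-loop sum.
theorem pv_getD_totals (sales : List (Int × Int)) (d : PySem.Dict Int Int) (k : Int) :
    (sales.foldl (fun (d : PySem.Dict Int Int) p => d.modify p.1 0 (· + p.2)) d).getD k 0
      = sales.foldl (fun acc p => if p.1 == k then acc + p.2 else acc) (d.getD k 0) := by
  induction sales generalizing d with
  | nil => rfl
  | cons p rest ih =>
    simp only [List.foldl_cons, ih]
    rw [PySem.Dict.getD_modify]
    by_cases h : p.1 = k
    · simp [h]
    · rw [if_neg (fun hk => h hk.symm)]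
      simp [h]

-- A's running-max loop over (best_total, best_day) is max-with-key: the day
-- component of A's fold state tracks max?'s fold state, the total component its key.
theorem pv_foldA_eq_max? (f : Int → Int) (xs : List Int) (o : Option Int) :
    (xs.foldl
      (fun (st : Option Int × Option Int) x =>
        let t := f x
        match st.1 with
        | none => (some t, some x)
        | some m => if t > m then (some t, some x) else st)
      (o.map f, o))
    = ((xs.foldl (fun acc x => match acc with
        | none => some x
        | some m => if f m < f x then some x else some m) o).map f,
       xs.foldl (fun acc x => match acc with
        | none => some x
        | some m => if f m < f x then some x else some m) o) := by
  induction xs generalizing o with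
  | nil => rfl
  | cons x rest ih =>
    cases o with
    | none => simpa using ih (some x)
    | some m =>
      simp only [List.foldl_cons, Option.map_some]
      by_cases h : f m < f x
      · simpa [h] using ih (some x)
      · simpa [h, gt_iff_lt] using ih (some m)

-- max?'s fold, named: Lean compiles the two textual matches to different matcher constants.
theorem pv_fold_eq_max? (f : Int → Int) (xs : List Int) :
    xs.foldl (fun (acc : Option Int) x => match acc with
        | none => some x
        | some m => if f m < f x then some x else some m) none
    = PySem.List.max? xs f := by
  unfold PySem.List.max?
  congr 1
  funext acc x
  cases acc <;> rfl

-- ===== VERDICT =====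
theorem find_best_sales_day_spec : Claim_equal_find_best_sales_day := by
  intro sales days _
  unfold Spec_find_best_sales_day find_best_sales_day find_best_sales_day_alt
  have hkey : (fun day => (sales.foldl (fun (d : PySem.Dict Int Int) p => d.modify p.1 0 (· + p.2)) PySem.Dict.empty).getD day 0)
      = fun day => sales.foldl (fun acc p => if p.1 == day then acc + p.2 else acc) 0 := by
    funext k
    rw [pv_getD_totals, PySem.Dict.getD_empty]
  simp only [hkey]
  rw [show ((none : Option Int), (none : Option Int)) = ((none : Option Int).map (fun day => sales.foldl (fun acc p => if p.1 == day then acc + p.2 else acc) 0), (none : Option Int)) from rfl,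
     pv_foldA_eq_max? (fun day => sales.foldl (fun acc p => if p.1 == day then acc + p.2 else acc) 0)]
  by_cases hd : days < 1
  · rw [if_pos hd, PySem.List.pyRange_one_eq_nil (by omega : days + 1 ≤ 1)]
    rfl
  · rw [if_neg hd, ← pv_fold_eq_max?]
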